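-- pv_equiv track=rewrite | github.com/BrianDen/wafw00f | wafw00f/lib/evillib.py | scrambledHeader
-- ===== SOURCE A (Python) =====
-- def scrambledHeader(header):
--     c = 'connection'
--     if len(header) != len(c):
--         return False
--     if header == c:
--         return False
--     for character in c:
--         if c.count(character) != header.count(character):
--             return False
--     return True
-- ===== SOURCE B (Python) =====
-- def scrambledHeader(header):
--     c = 'connection'
--     return header != c and sorted(header) == sorted(c)
-- ===== Notes on version B (the rewrite author's own statement) =====
-- stated objective: simpler
-- what changed: Replaces the length check plus per-character count loop with a single sort-and-compare anagram test: header is not equal to the constant and the sorted characters of both coincide.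
import Mathlib
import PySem

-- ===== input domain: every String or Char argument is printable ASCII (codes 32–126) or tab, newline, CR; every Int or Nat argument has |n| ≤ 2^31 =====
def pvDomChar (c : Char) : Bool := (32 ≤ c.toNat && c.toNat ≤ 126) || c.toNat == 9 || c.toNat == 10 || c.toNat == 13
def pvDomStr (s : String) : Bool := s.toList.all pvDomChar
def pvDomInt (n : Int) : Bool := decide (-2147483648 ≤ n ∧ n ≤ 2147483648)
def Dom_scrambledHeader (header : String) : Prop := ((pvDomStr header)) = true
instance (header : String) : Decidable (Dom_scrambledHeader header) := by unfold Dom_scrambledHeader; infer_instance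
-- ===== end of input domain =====

-- B replaces A's length check + per-character count loop by a single sort-and-compare
-- anagram test (simpler; equivalence proved below).

-- ===== PORT A =====
-- the 'for character in c: if c.count(character) != header.count(character): return False' loop
def pvCountLoop (header : String) : List Char → Bool
  | [] => true
  | ch :: rest =>
      if PySem.Str.count "connection" (String.ofList [ch]) ≠ PySem.Str.count header (String.ofList [ch]) then
        false
      else pvCountLoop header rest

def scrambledHeader (header : String) : Bool :=
  let c : String := "connection"
  if PySem.Str.len header ≠ PySem.Str.len c then false
  else if header == c then false
  else pvCountLoop header c.toList

-- ===== PORT B =====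
def scrambledHeader_alt (header : String) : Bool :=
  let c : String := "connection"
  header != c && (PySem.List.sorted header.toList (fun x => x) false ==
                  PySem.List.sorted c.toList (fun x => x) false)

-- ===== PRECONDITION & SPEC =====
def Spec_scrambledHeader (header : String) (out : Bool) : Prop := out = scrambledHeader_alt header
instance (header : String) (out : Bool) : Decidable (Spec_scrambledHeader header out) := by unfold Spec_scrambledHeader; infer_instance

-- ===== CLAIM (what is proved, stated in full; the proofs are below) =====
def Claim_equal_scrambledHeader : Prop := ∀ (header : String), Dom_scrambledHeader header → Spec_scrambledHeader header (scrambledHeader header)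

-- ===== LEMMAS AND PROOFS =====

-- Python str.count with a single-character needle is the character count.
theorem countGo_singleton (ch : Char) (fuel : Nat) (l : List Char) (acc : Nat)
    (h : l.length ≤ fuel) :
    PySem.Chars.count.go [ch] fuel l acc = acc + l.count ch := by
  induction fuel generalizing l acc with
  | zero =>
    have : l = [] := List.length_eq_zero_iff.mp (Nat.le_zero.mp h)
    subst this
    simp [PySem.Chars.count.go]
  | succ n ih =>
    cases l with
    | nil => simp [PySem.Chars.count.go]
    | cons a t =>
      have ht : t.length ≤ n := by simpa using h
      by_cases hpre : ([ch].isPrefixOf (a :: t)) = true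
      · have ha : ch = a := by simpa [List.isPrefixOf] using hpre
        subst ha
        rw [PySem.Chars.count.go]
        simp only [hpre, if_pos]
        have hdrop : List.drop [ch].length (ch :: t) = t := by simp
        rw [hdrop, ih t (acc + 1) ht]
        simp
        omega
      · have ha : ¬ (ch = a) := by
          simp [List.isPrefixOf] at hpre
          exact fun e => hpre (by simp [e])
        rw [PySem.Chars.count.go]
        simp only [hpre, if_neg, Bool.not_eq_true]
        rw [ih t acc ht]
        simp [Ne.symm ha]

theorem strCount_singleton (s : String) (ch : Char) :
    PySem.Str.count s (String.ofList [ch]) = s.toList.count ch := by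
  have htl : (String.ofList [ch]).toList = [ch] := by simp
  unfold PySem.Str.count
  rw [htl]
  unfold PySem.Chars.count
  simp only [List.isEmpty_cons, Bool.false_eq_true, if_neg, not_false_iff]
  rw [countGo_singleton ch s.toList.length s.toList 0 (le_refl _)]
  omega

-- the loop returns true iff every listed character has equal counts
theorem pvCountLoop_eq_all (header : String) (l : List Char) :
    pvCountLoop header l =
      l.all (fun ch => "connection".toList.count ch == header.toList.count ch) := by
  induction l with
  | nil => rfl
  | cons a t ih =>
    rw [pvCountLoop]
    simp only [strCount_singleton]
    by_cases h : "connection".toList.count a = header.toList.count a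
    · rw [if_neg (by simpa using h), List.all_cons, beq_iff_eq.mpr h, Bool.true_and, ih]
    · rw [if_pos (by simpa using h), List.all_cons,
         beq_eq_false_iff_ne.mpr h, Bool.false_and]

-- counts on the characters of t plus equal length force a permutation
theorem perm_of_counts (L T : List Char) (hlen : L.length = T.length)
    (hc : ∀ ch ∈ T, L.count ch = T.count ch) : L.Perm T := by
  rw [← Multiset.coe_eq_coe]
  have hm : ∀ ch ∈ T, Multiset.count ch (↑L : Multiset Char) = Multiset.count ch (↑T : Multiset Char) := by
    intro ch hch
    simpa [Multiset.coe_count] using hc ch hch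
  -- sums over the union of supports
  set U : Finset Char := (↑L : Multiset Char).toFinset ∪ (↑T : Multiset Char).toFinset with hU
  have hsumL : ∑ a ∈ U, Multiset.count a (↑L : Multiset Char) = L.length := by
    rw [show L.length = (↑L : Multiset Char).card from (Multiset.coe_card L).symm,
        ← Multiset.toFinset_sum_count_eq (↑L : Multiset Char)]
    · exact (Finset.sum_subset (Finset.subset_union_left) (by
        intro x _ hx
        rw [Multiset.count_eq_zero]
        exact fun h => hx (Multiset.mem_toFinset.mpr h))).symm
  have hsumT : ∑ a ∈ U, Multiset.count a (↑T : Multiset Char) = T.length := by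
    rw [show T.length = (↑T : Multiset Char).card from (Multiset.coe_card T).symm,
        ← Multiset.toFinset_sum_count_eq (↑T : Multiset Char)]
    · exact (Finset.sum_subset (Finset.subset_union_right) (by
        intro x _ hx
        rw [Multiset.count_eq_zero]
        exact fun h => hx (Multiset.mem_toFinset.mpr h))).symm
  have hle : ∀ a ∈ U, Multiset.count a (↑T : Multiset Char) ≤ Multiset.count a (↑L : Multiset Char) := by
    intro a _
    by_cases ha : a ∈ T
    · exact (hm a ha).ge
    · simp [ha]
  have hsum_eq : ∑ a ∈ U, Multiset.count a (↑T : Multiset Char)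
      = ∑ a ∈ U, Multiset.count a (↑L : Multiset Char) := by
    rw [hsumL, hsumT, hlen]
  have hall := (Finset.sum_eq_sum_iff_of_le hle).mp hsum_eq
  ext a
  by_cases haU : a ∈ U
  · exact (hall a haU).symm
  · have h1 : a ∉ L := fun h => haU (Finset.mem_union_left _ (Multiset.mem_toFinset.mpr (by simpa using h)))
    have h2 : a ∉ T := fun h => haU (Finset.mem_union_right _ (Multiset.mem_toFinset.mpr (by simpa using h)))
    simp [h1, h2]

-- ===== VERDICT (by name: the statement is the Claim_ definition above) =====
theorem scrambledHeader_spec : Claim_equal_scrambledHeader := by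
  intro header _
  show scrambledHeader header = scrambledHeader_alt header
  unfold scrambledHeader scrambledHeader_alt
  simp only []
  by_cases heq : header = "connection"
  · subst heq
    simp
  · have hbne : (header != "connection") = true := by simp [heq]
    have hbeq : (header == "connection") = false := by simp [heq]
    rw [hbeq]
    by_cases hperm : header.toList.Perm "connection".toList
    · -- permutation: lengths equal, all counts equal, sorted lists equal
      have hlen : PySem.Str.len header = PySem.Str.len "connection" := by
        rw [PySem.Str.len_eq, PySem.Str.len_eq, hperm.length_eq]
      rw [if_neg (not_ne_iff.mpr hlen), if_neg (by simp), pvCountLoop_eq_all]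
      have hall : ("connection".toList.all
          (fun ch => "connection".toList.count ch == header.toList.count ch)) = true := by
        rw [List.all_eq_true]
        intro ch _
        simp [hperm.count_eq ch]
      rw [hall]
      rw [hbne, Bool.true_and]
      exact (beq_iff_eq.mpr ((PySem.List.sorted_id_eq_sorted_id_iff_perm _ _).mpr hperm)).symm
    · -- no permutation: B is false; show A is false too
      have hsorted : ((PySem.List.sorted header.toList (fun x => x) false ==
          PySem.List.sorted "connection".toList (fun x => x) false)) = false := by
        rw [beq_eq_false_iff_ne]
        intro h
        exact hperm ((PySem.List.sorted_id_eq_sorted_id_iff_perm _ _).mp h)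
      rw [hbne, hsorted, Bool.true_and]
      by_cases hlen : PySem.Str.len header ≠ PySem.Str.len "connection"
      · rw [if_pos hlen]
      · rw [if_neg hlen, if_neg (by simp)]
        rw [not_ne_iff] at hlen
        have hlen' : header.toList.length = "connection".toList.length := by
          rw [PySem.Str.len_eq, PySem.Str.len_eq] at hlen
          exact_mod_cast hlen
        rw [pvCountLoop_eq_all]
        by_contra hcon
        rw [Bool.not_eq_false, List.all_eq_true] at hcon
        apply hperm
        apply perm_of_counts _ _ hlen'
        intro ch hch
        have := hcon ch hch
        exact (beq_iff_eq.mp this).symm
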